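-- pv_equiv track=rewrite | github.com/Auzzy/movie-schedule-viewer | retriever/schedule.py | _attributes_to_fmt
-- ===== SOURCE A (Python) =====
-- def _attributes_to_fmt(raw_attributes):
--     attributes = [a.lower() for a in raw_attributes]
--     if "dolby cinema @ amc" in attributes:
--         return "Dolby"
--     elif "imax" in attributes:
--         return "IMAX"
--     elif "reald 3d" in attributes or "digital 3d" in attributes:
--         return "3D"
--     elif "xl at amc" in attributes:
--         return "XL at AMC"
--     elif "d-box" in attributes:
--         return "D-Box"
--     elif "acx" in attributes:
--         return "Apple Cinemas Experience"
--     elif "screenx" in attributes: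
--         return "ScreenX"
--     elif "laser at amc" in attributes or "standard format" in attributes:
--         return "Standard"
--     return raw_attributes[0]
-- ===== SOURCE B (Python) =====
-- _FMT_BY_KEYWORD = {
--     "dolby cinema @ amc": (0, "Dolby"),
--     "imax": (1, "IMAX"),
--     "reald 3d": (2, "3D"),
--     "digital 3d": (2, "3D"),
--     "xl at amc": (3, "XL at AMC"),
--     "d-box": (4, "D-Box"),
--     "acx": (5, "Apple Cinemas Experience"),
--     "screenx": (6, "ScreenX"),
--     "laser at amc": (7, "Standard"),
--     "standard format": (7, "Standard"),
-- }
--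
--
-- def _attributes_to_fmt(raw_attributes):
--     # One pass over the attributes: keep the hit with the smallest priority.
--     best = None
--     for a in raw_attributes:
--         hit = _FMT_BY_KEYWORD.get(a.lower())
--         if hit is not None and (best is None or hit[0] < best[0]):
--             best = hit
--     if best is not None:
--         return best[1]
--     return raw_attributes[0]
-- ===== Notes on version B (the rewrite author's own statement) =====
-- stated objective: alternative
-- what changed: Inverts the traversal: instead of A's 8-branch if/elif cascade of membership tests over the attribute list, B scans the attributes once, looks each lowercased attribute up in a keyword-to-(priority,label) dict and keeps the minimum-priority hit with an accumulator.
import Mathlib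
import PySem

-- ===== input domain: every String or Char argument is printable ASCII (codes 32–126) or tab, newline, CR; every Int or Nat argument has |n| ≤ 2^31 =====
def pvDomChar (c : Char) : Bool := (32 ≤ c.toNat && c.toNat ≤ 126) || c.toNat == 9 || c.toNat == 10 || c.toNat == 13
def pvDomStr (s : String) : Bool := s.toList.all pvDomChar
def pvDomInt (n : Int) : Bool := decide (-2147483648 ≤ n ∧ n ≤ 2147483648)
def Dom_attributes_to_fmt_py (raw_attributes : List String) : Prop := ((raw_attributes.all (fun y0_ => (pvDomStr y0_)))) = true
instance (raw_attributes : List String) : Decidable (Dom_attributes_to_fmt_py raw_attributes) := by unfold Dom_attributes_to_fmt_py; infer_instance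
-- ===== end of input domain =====

-- B inverts A's traversal: one pass over the attributes with a keyword→(priority,label)
-- dict and a min-priority accumulator, instead of A's if/elif cascade of membership tests
-- (objective: alternative).

-- ===== PORT A =====
def attributes_to_fmt_py (raw_attributes : List String) : String :=
  let attributes := raw_attributes.map PySem.Str.lower
  if attributes.contains "dolby cinema @ amc" then "Dolby"
  else if attributes.contains "imax" then "IMAX"
  else if attributes.contains "reald 3d" || attributes.contains "digital 3d" then "3D"
  else if attributes.contains "xl at amc" then "XL at AMC"
  else if attributes.contains "d-box" then "D-Box"
  else if attributes.contains "acx" then "Apple Cinemas Experience"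
  else if attributes.contains "screenx" then "ScreenX"
  else if attributes.contains "laser at amc" || attributes.contains "standard format" then "Standard"
  else (PySem.List.pyGet? raw_attributes 0).getD ""  -- raw_attributes[0]; Pre_ excludes the IndexError ([])

-- ===== PORT B =====
-- _FMT_BY_KEYWORD
def fmtByKeyword : PySem.Dict String (Int × String) := PySem.Dict.ofList
  [ ("dolby cinema @ amc", (0, "Dolby")),
    ("imax", (1, "IMAX")),
    ("reald 3d", (2, "3D")),
    ("digital 3d", (2, "3D")),
    ("xl at amc", (3, "XL at AMC")),
    ("d-box", (4, "D-Box")),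
    ("acx", (5, "Apple Cinemas Experience")),
    ("screenx", (6, "ScreenX")),
    ("laser at amc", (7, "Standard")),
    ("standard format", (7, "Standard")) ]

-- body of the 'for a in raw_attributes' loop
def fmtStep (best : Option (Int × String)) (a : String) : Option (Int × String) :=
  match PySem.Dict.get? fmtByKeyword (PySem.Str.lower a) with
  | none => best
  | some hit =>
      match best with
      | none => some hit
      | some b => if hit.1 < b.1 then some hit else best

def attributes_to_fmt_py_alt (raw_attributes : List String) : String :=
  match raw_attributes.foldl fmtStep none with
  | some best => best.2
  | none => (PySem.List.pyGet? raw_attributes 0).getD ""  -- raw_attributes[0]; Pre_ excludes []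

-- ===== PRECONDITION & SPEC =====
-- A raises IndexError exactly on the empty list (raw_attributes[0]); B raises there too.
def Pre_attributes_to_fmt_py (raw_attributes : List String) : Prop := raw_attributes ≠ []
instance (raw_attributes : List String) : Decidable (Pre_attributes_to_fmt_py raw_attributes) := by unfold Pre_attributes_to_fmt_py; infer_instance
def pvWitness_attributes_to_fmt_py : List String := ["IMAX", "RealD 3D"]

def Spec_attributes_to_fmt_py (raw_attributes : List String) (out : String) : Prop := out = attributes_to_fmt_py_alt raw_attributes
instance (raw_attributes : List String) (out : String) : Decidable (Spec_attributes_to_fmt_py raw_attributes out) := by unfold Spec_attributes_to_fmt_py; infer_instance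

-- ===== CLAIM (what is proved, stated in full; the proofs are below) =====
def Claim_equal_attributes_to_fmt_py : Prop := ∀ (raw_attributes : List String), Dom_attributes_to_fmt_py raw_attributes → Pre_attributes_to_fmt_py raw_attributes → Spec_attributes_to_fmt_py raw_attributes (attributes_to_fmt_py raw_attributes)

-- ===== LEMMAS AND PROOFS =====

-- abbreviation used only by the proofs
def lk (a : String) : Option (Int × String) := PySem.Dict.get? fmtByKeyword (PySem.Str.lower a)

theorem fmtStep_of_none (b : Option (Int × String)) (x : String) (h : lk x = none) :
    fmtStep b x = b := by
  unfold lk at h; unfold fmtStep; rw [h]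

theorem fmtStep_none_of_some (x : String) (q : Int × String) (h : lk x = some q) :
    fmtStep none x = some q := by
  unfold lk at h; unfold fmtStep; rw [h]

theorem fmtStep_some_of_some (x : String) (q pb : Int × String) (h : lk x = some q) :
    fmtStep (some pb) x = if q.1 < pb.1 then some q else some pb := by
  unfold lk at h; unfold fmtStep; rw [h]

set_option maxRecDepth 8192 in
theorem lk_cases (a : String) (q : Int × String) (h : lk a = some q) :
    (PySem.Str.lower a = "dolby cinema @ amc" ∧ q = (0, "Dolby")) ∨
    (PySem.Str.lower a = "imax" ∧ q = (1, "IMAX")) ∨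
    (PySem.Str.lower a = "reald 3d" ∧ q = (2, "3D")) ∨
    (PySem.Str.lower a = "digital 3d" ∧ q = (2, "3D")) ∨
    (PySem.Str.lower a = "xl at amc" ∧ q = (3, "XL at AMC")) ∨
    (PySem.Str.lower a = "d-box" ∧ q = (4, "D-Box")) ∨
    (PySem.Str.lower a = "acx" ∧ q = (5, "Apple Cinemas Experience")) ∨
    (PySem.Str.lower a = "screenx" ∧ q = (6, "ScreenX")) ∨
    (PySem.Str.lower a = "laser at amc" ∧ q = (7, "Standard")) ∨
    (PySem.Str.lower a = "standard format" ∧ q = (7, "Standard")) := by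
  have hmk : fmtByKeyword = PySem.Dict.mk
      [ ("dolby cinema @ amc", (0, "Dolby")), ("imax", (1, "IMAX")),
        ("reald 3d", (2, "3D")), ("digital 3d", (2, "3D")),
        ("xl at amc", (3, "XL at AMC")), ("d-box", (4, "D-Box")),
        ("acx", (5, "Apple Cinemas Experience")), ("screenx", (6, "ScreenX")),
        ("laser at amc", (7, "Standard")), ("standard format", (7, "Standard")) ] := by decide
  unfold lk at h
  rw [hmk] at h
  simp only [PySem.Dict.get?_mk_cons] at h
  split_ifs at h with h1 h2 h3 h4 h5 h6 h7 h8 h9 h10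
  · exact Or.inl ⟨(beq_iff_eq.1 h1).symm, (Option.some.injEq _ _ ▸ h).symm⟩
  · exact Or.inr (Or.inl ⟨(beq_iff_eq.1 h2).symm, (Option.some.injEq _ _ ▸ h).symm⟩)
  · exact Or.inr (Or.inr (Or.inl ⟨(beq_iff_eq.1 h3).symm, (Option.some.injEq _ _ ▸ h).symm⟩))
  · exact Or.inr (Or.inr (Or.inr (Or.inl ⟨(beq_iff_eq.1 h4).symm, (Option.some.injEq _ _ ▸ h).symm⟩)))
  · exact Or.inr (Or.inr (Or.inr (Or.inr (Or.inl ⟨(beq_iff_eq.1 h5).symm, (Option.some.injEq _ _ ▸ h).symm⟩))))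
  · exact Or.inr (Or.inr (Or.inr (Or.inr (Or.inr (Or.inl ⟨(beq_iff_eq.1 h6).symm, (Option.some.injEq _ _ ▸ h).symm⟩)))))
  · exact Or.inr (Or.inr (Or.inr (Or.inr (Or.inr (Or.inr (Or.inl ⟨(beq_iff_eq.1 h7).symm, (Option.some.injEq _ _ ▸ h).symm⟩))))))
  · exact Or.inr (Or.inr (Or.inr (Or.inr (Or.inr (Or.inr (Or.inr (Or.inl ⟨(beq_iff_eq.1 h8).symm, (Option.some.injEq _ _ ▸ h).symm⟩)))))))
  · exact Or.inr (Or.inr (Or.inr (Or.inr (Or.inr (Or.inr (Or.inr (Or.inr (Or.inl ⟨(beq_iff_eq.1 h9).symm, (Option.some.injEq _ _ ▸ h).symm⟩))))))))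
  · exact Or.inr (Or.inr (Or.inr (Or.inr (Or.inr (Or.inr (Or.inr (Or.inr (Or.inr ⟨(beq_iff_eq.1 h10).symm, (Option.some.injEq _ _ ▸ h).symm⟩))))))))
  · exact absurd h (by simp [PySem.Dict.get?])

theorem contains_of_mem (raw : List String) (a k : String)
    (ha : a ∈ raw) (hl : PySem.Str.lower a = k) :
    (raw.map PySem.Str.lower).contains k = true := by
  rw [List.contains_iff_mem]
  exact hl ▸ List.mem_map_of_mem ha

theorem contains_exists (raw : List String) (k : String)
    (h : (raw.map PySem.Str.lower).contains k = true) :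
    ∃ a ∈ raw, PySem.Str.lower a = k := by
  rw [List.contains_iff_mem, List.mem_map] at h
  exact h

theorem fold_eq_none_iff (xs : List String) (b : Option (Int × String)) :
    xs.foldl fmtStep b = none ↔ b = none ∧ ∀ a ∈ xs, lk a = none := by
  induction xs generalizing b with
  | nil => simp
  | cons x xs ih =>
      rw [List.foldl_cons, ih]
      constructor
      · rintro ⟨hstep, hrest⟩
        have hbx : b = none ∧ lk x = none := by
          cases hx : lk x with
          | none => rw [fmtStep_of_none b x hx] at hstep; exact ⟨hstep, rfl⟩
          | some q =>
              cases b with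
              | none => rw [fmtStep_none_of_some x q hx] at hstep; simp at hstep
              | some pb =>
                  rw [fmtStep_some_of_some x q pb hx] at hstep
                  split at hstep <;> simp at hstep
        refine ⟨hbx.1, fun a ha => ?_⟩
        rcases List.mem_cons.1 ha with rfl | ha'
        · exact hbx.2
        · exact hrest a ha'
      · rintro ⟨rfl, hall⟩
        rw [fmtStep_of_none none x (hall x List.mem_cons_self)]
        exact ⟨rfl, fun a ha => hall a (List.mem_cons_of_mem _ ha)⟩

theorem fold_attain (xs : List String) (b : Option (Int × String)) (p : Int × String)
    (h : xs.foldl fmtStep b = some p) :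
    b = some p ∨ ∃ a ∈ xs, lk a = some p := by
  induction xs generalizing b with
  | nil => simp at h; exact Or.inl (by rw [h])
  | cons x xs ih =>
      rw [List.foldl_cons] at h
      rcases ih _ h with hstep | ⟨a, ha, hq⟩
      · cases hx : lk x with
        | none => rw [fmtStep_of_none b x hx] at hstep; exact Or.inl hstep
        | some q =>
            cases b with
            | none =>
                rw [fmtStep_none_of_some x q hx] at hstep
                exact Or.inr ⟨x, List.mem_cons_self, hstep ▸ hx⟩
            | some pb =>
                rw [fmtStep_some_of_some x q pb hx] at hstep
                split at hstep
                · exact Or.inr ⟨x, List.mem_cons_self, hstep ▸ hx⟩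
                · exact Or.inl hstep
      · exact Or.inr ⟨a, List.mem_cons_of_mem _ ha, hq⟩

theorem step_some (pb : Int × String) (x : String) :
    ∃ r, fmtStep (some pb) x = some r ∧ r.1 ≤ pb.1 := by
  cases hx : lk x with
  | none => exact ⟨pb, fmtStep_of_none _ x hx, le_refl _⟩
  | some q =>
      rw [fmtStep_some_of_some x q pb hx]
      by_cases hq : q.1 < pb.1
      · exact ⟨q, by simp [hq], le_of_lt hq⟩
      · exact ⟨pb, by simp [hq], le_refl _⟩

theorem fold_le (xs : List String) (pb p : Int × String)
    (h : xs.foldl fmtStep (some pb) = some p) : p.1 ≤ pb.1 := by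
  induction xs generalizing pb with
  | nil => simp at h; rw [← h]
  | cons x xs ih =>
      rw [List.foldl_cons] at h
      obtain ⟨r, hr, hle⟩ := step_some pb x
      rw [hr] at h
      exact le_trans (ih _ h) hle

theorem fold_min (xs : List String) (b : Option (Int × String)) (p : Int × String)
    (h : xs.foldl fmtStep b = some p) :
    ∀ a ∈ xs, ∀ q, lk a = some q → p.1 ≤ q.1 := by
  induction xs generalizing b with
  | nil => simp
  | cons x xs ih =>
      rw [List.foldl_cons] at h
      intro a ha q hq
      rcases List.mem_cons.1 ha with rfl | ha'
      · have hstep : ∃ r, fmtStep b a = some r ∧ r.1 ≤ q.1 := by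
          cases b with
          | none => exact ⟨q, fmtStep_none_of_some a q hq, le_refl _⟩
          | some pb =>
              rw [fmtStep_some_of_some a q pb hq]
              by_cases hlt : q.1 < pb.1
              · exact ⟨q, by simp [hlt], le_refl _⟩
              · exact ⟨pb, by simp [hlt], le_of_not_gt hlt⟩
        obtain ⟨r, hr, hle⟩ := hstep
        rw [hr] at h
        exact le_trans (fold_le xs r p h) hle
      · exact ih _ h a ha' q hq

-- if some attribute hits with the minimum priority r and label, the fold returns exactly (r, label)
theorem fold_exact (raw : List String) (r : Int) (label : String)
    (hub : ∃ a ∈ raw, lk a = some (r, label))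
    (hlb : ∀ a ∈ raw, ∀ q, lk a = some q → r ≤ q.1 ∧ (q.1 = r → q.2 = label)) :
    raw.foldl fmtStep none = some (r, label) := by
  obtain ⟨a0, ha0, hlk0⟩ := hub
  cases hfold : raw.foldl fmtStep none with
  | none =>
      have hall := ((fold_eq_none_iff raw none).1 hfold).2
      rw [hall a0 ha0] at hlk0
      simp at hlk0
  | some p =>
      rcases fold_attain raw none p hfold with hb | ⟨a1, ha1, hq1⟩
      · simp at hb
      · have h1 : p.1 ≤ r := fold_min raw none p hfold a0 ha0 _ hlk0
        have h2 := hlb a1 ha1 p hq1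
        have hp1 : p.1 = r := le_antisymm h1 h2.1
        have hp2 : p.2 = label := h2.2 hp1
        rw [show p = (r, label) from Prod.ext hp1 hp2]

-- ===== VERDICT (by name: the statement is the Claim_ definition above) =====
theorem attributes_to_fmt_py_spec : Claim_equal_attributes_to_fmt_py := by
  intro raw _ _
  unfold Spec_attributes_to_fmt_py attributes_to_fmt_py attributes_to_fmt_py_alt
  dsimp only
  split_ifs with h1 h2 h3 h4 h5 h6 h7 h8
  · -- branch 1: "Dolby"
    have hub : ∃ a ∈ raw, lk a = some ((0 : Int), "Dolby") := by
      obtain ⟨a0, ha0, hl0⟩ := contains_exists raw _ h1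
      exact ⟨a0, ha0, by unfold lk; rw [hl0]; rfl⟩
    have hlb : ∀ a ∈ raw, ∀ q, lk a = some q → ((0 : Int)) ≤ q.1 ∧ (q.1 = (0 : Int) → q.2 = "Dolby") := by
      intro a ha q hq
      rcases lk_cases a q hq with ⟨hs, rfl⟩ | ⟨hs, rfl⟩ | ⟨hs, rfl⟩ | ⟨hs, rfl⟩ | ⟨hs, rfl⟩ | ⟨hs, rfl⟩ | ⟨hs, rfl⟩ | ⟨hs, rfl⟩ | ⟨hs, rfl⟩ | ⟨hs, rfl⟩
      · exact ⟨le_refl _, fun _ => rfl⟩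
      · exact ⟨by norm_num, by intro hh; norm_num at hh⟩
      · exact ⟨by norm_num, by intro hh; norm_num at hh⟩
      · exact ⟨by norm_num, by intro hh; norm_num at hh⟩
      · exact ⟨by norm_num, by intro hh; norm_num at hh⟩
      · exact ⟨by norm_num, by intro hh; norm_num at hh⟩
      · exact ⟨by norm_num, by intro hh; norm_num at hh⟩
      · exact ⟨by norm_num, by intro hh; norm_num at hh⟩
      · exact ⟨by norm_num, by intro hh; norm_num at hh⟩
      · exact ⟨by norm_num, by intro hh; norm_num at hh⟩
    rw [fold_exact raw (0 : Int) "Dolby" hub hlb]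
  · -- branch 2: "IMAX"
    have hub : ∃ a ∈ raw, lk a = some ((1 : Int), "IMAX") := by
      obtain ⟨a0, ha0, hl0⟩ := contains_exists raw _ h2
      exact ⟨a0, ha0, by unfold lk; rw [hl0]; rfl⟩
    have hlb : ∀ a ∈ raw, ∀ q, lk a = some q → ((1 : Int)) ≤ q.1 ∧ (q.1 = (1 : Int) → q.2 = "IMAX") := by
      intro a ha q hq
      rcases lk_cases a q hq with ⟨hs, rfl⟩ | ⟨hs, rfl⟩ | ⟨hs, rfl⟩ | ⟨hs, rfl⟩ | ⟨hs, rfl⟩ | ⟨hs, rfl⟩ | ⟨hs, rfl⟩ | ⟨hs, rfl⟩ | ⟨hs, rfl⟩ | ⟨hs, rfl⟩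
      · exact absurd (contains_of_mem raw a _ ha hs) h1
      · exact ⟨le_refl _, fun _ => rfl⟩
      · exact ⟨by norm_num, by intro hh; norm_num at hh⟩
      · exact ⟨by norm_num, by intro hh; norm_num at hh⟩
      · exact ⟨by norm_num, by intro hh; norm_num at hh⟩
      · exact ⟨by norm_num, by intro hh; norm_num at hh⟩
      · exact ⟨by norm_num, by intro hh; norm_num at hh⟩
      · exact ⟨by norm_num, by intro hh; norm_num at hh⟩
      · exact ⟨by norm_num, by intro hh; norm_num at hh⟩
      · exact ⟨by norm_num, by intro hh; norm_num at hh⟩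
    rw [fold_exact raw (1 : Int) "IMAX" hub hlb]
  · -- branch 3: "3D"
    have hub : ∃ a ∈ raw, lk a = some ((2 : Int), "3D") := by
      rw [Bool.or_eq_true] at h3
      rcases h3 with hpos | hpos <;>
        · obtain ⟨a0, ha0, hl0⟩ := contains_exists raw _ hpos
          exact ⟨a0, ha0, by unfold lk; rw [hl0]; rfl⟩
    have hlb : ∀ a ∈ raw, ∀ q, lk a = some q → ((2 : Int)) ≤ q.1 ∧ (q.1 = (2 : Int) → q.2 = "3D") := by
      intro a ha q hq
      rcases lk_cases a q hq with ⟨hs, rfl⟩ | ⟨hs, rfl⟩ | ⟨hs, rfl⟩ | ⟨hs, rfl⟩ | ⟨hs, rfl⟩ | ⟨hs, rfl⟩ | ⟨hs, rfl⟩ | ⟨hs, rfl⟩ | ⟨hs, rfl⟩ | ⟨hs, rfl⟩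
      · exact absurd (contains_of_mem raw a _ ha hs) h1
      · exact absurd (contains_of_mem raw a _ ha hs) h2
      · exact ⟨le_refl _, fun _ => rfl⟩
      · exact ⟨le_refl _, fun _ => rfl⟩
      · exact ⟨by norm_num, by intro hh; norm_num at hh⟩
      · exact ⟨by norm_num, by intro hh; norm_num at hh⟩
      · exact ⟨by norm_num, by intro hh; norm_num at hh⟩
      · exact ⟨by norm_num, by intro hh; norm_num at hh⟩
      · exact ⟨by norm_num, by intro hh; norm_num at hh⟩
      · exact ⟨by norm_num, by intro hh; norm_num at hh⟩
    rw [fold_exact raw (2 : Int) "3D" hub hlb]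
  · -- branch 4: "XL at AMC"
    rw [Bool.or_eq_true, not_or] at h3
    have hub : ∃ a ∈ raw, lk a = some ((3 : Int), "XL at AMC") := by
      obtain ⟨a0, ha0, hl0⟩ := contains_exists raw _ h4
      exact ⟨a0, ha0, by unfold lk; rw [hl0]; rfl⟩
    have hlb : ∀ a ∈ raw, ∀ q, lk a = some q → ((3 : Int)) ≤ q.1 ∧ (q.1 = (3 : Int) → q.2 = "XL at AMC") := by
      intro a ha q hq
      rcases lk_cases a q hq with ⟨hs, rfl⟩ | ⟨hs, rfl⟩ | ⟨hs, rfl⟩ | ⟨hs, rfl⟩ | ⟨hs, rfl⟩ | ⟨hs, rfl⟩ | ⟨hs, rfl⟩ | ⟨hs, rfl⟩ | ⟨hs, rfl⟩ | ⟨hs, rfl⟩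
      · exact absurd (contains_of_mem raw a _ ha hs) h1
      · exact absurd (contains_of_mem raw a _ ha hs) h2
      · exact absurd (contains_of_mem raw a _ ha hs) h3.1
      · exact absurd (contains_of_mem raw a _ ha hs) h3.2
      · exact ⟨le_refl _, fun _ => rfl⟩
      · exact ⟨by norm_num, by intro hh; norm_num at hh⟩
      · exact ⟨by norm_num, by intro hh; norm_num at hh⟩
      · exact ⟨by norm_num, by intro hh; norm_num at hh⟩
      · exact ⟨by norm_num, by intro hh; norm_num at hh⟩
      · exact ⟨by norm_num, by intro hh; norm_num at hh⟩
    rw [fold_exact raw (3 : Int) "XL at AMC" hub hlb]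
  · -- branch 5: "D-Box"
    rw [Bool.or_eq_true, not_or] at h3
    have hub : ∃ a ∈ raw, lk a = some ((4 : Int), "D-Box") := by
      obtain ⟨a0, ha0, hl0⟩ := contains_exists raw _ h5
      exact ⟨a0, ha0, by unfold lk; rw [hl0]; rfl⟩
    have hlb : ∀ a ∈ raw, ∀ q, lk a = some q → ((4 : Int)) ≤ q.1 ∧ (q.1 = (4 : Int) → q.2 = "D-Box") := by
      intro a ha q hq
      rcases lk_cases a q hq with ⟨hs, rfl⟩ | ⟨hs, rfl⟩ | ⟨hs, rfl⟩ | ⟨hs, rfl⟩ | ⟨hs, rfl⟩ | ⟨hs, rfl⟩ | ⟨hs, rfl⟩ | ⟨hs, rfl⟩ | ⟨hs, rfl⟩ | ⟨hs, rfl⟩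
      · exact absurd (contains_of_mem raw a _ ha hs) h1
      · exact absurd (contains_of_mem raw a _ ha hs) h2
      · exact absurd (contains_of_mem raw a _ ha hs) h3.1
      · exact absurd (contains_of_mem raw a _ ha hs) h3.2
      · exact absurd (contains_of_mem raw a _ ha hs) h4
      · exact ⟨le_refl _, fun _ => rfl⟩
      · exact ⟨by norm_num, by intro hh; norm_num at hh⟩
      · exact ⟨by norm_num, by intro hh; norm_num at hh⟩
      · exact ⟨by norm_num, by intro hh; norm_num at hh⟩
      · exact ⟨by norm_num, by intro hh; norm_num at hh⟩
    rw [fold_exact raw (4 : Int) "D-Box" hub hlb]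
  · -- branch 6: "Apple Cinemas Experience"
    rw [Bool.or_eq_true, not_or] at h3
    have hub : ∃ a ∈ raw, lk a = some ((5 : Int), "Apple Cinemas Experience") := by
      obtain ⟨a0, ha0, hl0⟩ := contains_exists raw _ h6
      exact ⟨a0, ha0, by unfold lk; rw [hl0]; rfl⟩
    have hlb : ∀ a ∈ raw, ∀ q, lk a = some q → ((5 : Int)) ≤ q.1 ∧ (q.1 = (5 : Int) → q.2 = "Apple Cinemas Experience") := by
      intro a ha q hq
      rcases lk_cases a q hq with ⟨hs, rfl⟩ | ⟨hs, rfl⟩ | ⟨hs, rfl⟩ | ⟨hs, rfl⟩ | ⟨hs, rfl⟩ | ⟨hs, rfl⟩ | ⟨hs, rfl⟩ | ⟨hs, rfl⟩ | ⟨hs, rfl⟩ | ⟨hs, rfl⟩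
      · exact absurd (contains_of_mem raw a _ ha hs) h1
      · exact absurd (contains_of_mem raw a _ ha hs) h2
      · exact absurd (contains_of_mem raw a _ ha hs) h3.1
      · exact absurd (contains_of_mem raw a _ ha hs) h3.2
      · exact absurd (contains_of_mem raw a _ ha hs) h4
      · exact absurd (contains_of_mem raw a _ ha hs) h5
      · exact ⟨le_refl _, fun _ => rfl⟩
      · exact ⟨by norm_num, by intro hh; norm_num at hh⟩
      · exact ⟨by norm_num, by intro hh; norm_num at hh⟩
      · exact ⟨by norm_num, by intro hh; norm_num at hh⟩
    rw [fold_exact raw (5 : Int) "Apple Cinemas Experience" hub hlb]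
  · -- branch 7: "ScreenX"
    rw [Bool.or_eq_true, not_or] at h3
    have hub : ∃ a ∈ raw, lk a = some ((6 : Int), "ScreenX") := by
      obtain ⟨a0, ha0, hl0⟩ := contains_exists raw _ h7
      exact ⟨a0, ha0, by unfold lk; rw [hl0]; rfl⟩
    have hlb : ∀ a ∈ raw, ∀ q, lk a = some q → ((6 : Int)) ≤ q.1 ∧ (q.1 = (6 : Int) → q.2 = "ScreenX") := by
      intro a ha q hq
      rcases lk_cases a q hq with ⟨hs, rfl⟩ | ⟨hs, rfl⟩ | ⟨hs, rfl⟩ | ⟨hs, rfl⟩ | ⟨hs, rfl⟩ | ⟨hs, rfl⟩ | ⟨hs, rfl⟩ | ⟨hs, rfl⟩ | ⟨hs, rfl⟩ | ⟨hs, rfl⟩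
      · exact absurd (contains_of_mem raw a _ ha hs) h1
      · exact absurd (contains_of_mem raw a _ ha hs) h2
      · exact absurd (contains_of_mem raw a _ ha hs) h3.1
      · exact absurd (contains_of_mem raw a _ ha hs) h3.2
      · exact absurd (contains_of_mem raw a _ ha hs) h4
      · exact absurd (contains_of_mem raw a _ ha hs) h5
      · exact absurd (contains_of_mem raw a _ ha hs) h6
      · exact ⟨le_refl _, fun _ => rfl⟩
      · exact ⟨by norm_num, by intro hh; norm_num at hh⟩
      · exact ⟨by norm_num, by intro hh; norm_num at hh⟩
    rw [fold_exact raw (6 : Int) "ScreenX" hub hlb]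
  · -- branch 8: "Standard"
    rw [Bool.or_eq_true, not_or] at h3
    have hub : ∃ a ∈ raw, lk a = some ((7 : Int), "Standard") := by
      rw [Bool.or_eq_true] at h8
      rcases h8 with hpos | hpos <;>
        · obtain ⟨a0, ha0, hl0⟩ := contains_exists raw _ hpos
          exact ⟨a0, ha0, by unfold lk; rw [hl0]; rfl⟩
    have hlb : ∀ a ∈ raw, ∀ q, lk a = some q → ((7 : Int)) ≤ q.1 ∧ (q.1 = (7 : Int) → q.2 = "Standard") := by
      intro a ha q hq
      rcases lk_cases a q hq with ⟨hs, rfl⟩ | ⟨hs, rfl⟩ | ⟨hs, rfl⟩ | ⟨hs, rfl⟩ | ⟨hs, rfl⟩ | ⟨hs, rfl⟩ | ⟨hs, rfl⟩ | ⟨hs, rfl⟩ | ⟨hs, rfl⟩ | ⟨hs, rfl⟩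
      · exact absurd (contains_of_mem raw a _ ha hs) h1
      · exact absurd (contains_of_mem raw a _ ha hs) h2
      · exact absurd (contains_of_mem raw a _ ha hs) h3.1
      · exact absurd (contains_of_mem raw a _ ha hs) h3.2
      · exact absurd (contains_of_mem raw a _ ha hs) h4
      · exact absurd (contains_of_mem raw a _ ha hs) h5
      · exact absurd (contains_of_mem raw a _ ha hs) h6
      · exact absurd (contains_of_mem raw a _ ha hs) h7
      · exact ⟨le_refl _, fun _ => rfl⟩
      · exact ⟨le_refl _, fun _ => rfl⟩
    rw [fold_exact raw (7 : Int) "Standard" hub hlb]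
  · -- fallback: no keyword matched
    rw [Bool.or_eq_true, not_or] at h3 h8
    have hnone : raw.foldl fmtStep none = none := by
      refine (fold_eq_none_iff raw none).2 ⟨rfl, fun a ha => ?_⟩
      cases hq : lk a with
      | none => rfl
      | some q =>
          rcases lk_cases a q hq with ⟨hs, rfl⟩ | ⟨hs, rfl⟩ | ⟨hs, rfl⟩ | ⟨hs, rfl⟩ | ⟨hs, rfl⟩ | ⟨hs, rfl⟩ | ⟨hs, rfl⟩ | ⟨hs, rfl⟩ | ⟨hs, rfl⟩ | ⟨hs, rfl⟩
          · exact absurd (contains_of_mem raw a _ ha hs) h1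
          · exact absurd (contains_of_mem raw a _ ha hs) h2
          · exact absurd (contains_of_mem raw a _ ha hs) h3.1
          · exact absurd (contains_of_mem raw a _ ha hs) h3.2
          · exact absurd (contains_of_mem raw a _ ha hs) h4
          · exact absurd (contains_of_mem raw a _ ha hs) h5
          · exact absurd (contains_of_mem raw a _ ha hs) h6
          · exact absurd (contains_of_mem raw a _ ha hs) h7
          · exact absurd (contains_of_mem raw a _ ha hs) h8.1
          · exact absurd (contains_of_mem raw a _ ha hs) h8.2
    rw [hnone]
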